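-- pv_equiv track=rewrite | github.com/PascalHaefeli/hangman.py | hangman.py | create_underscores
-- ===== SOURCE A (Python) =====
-- def create_underscores(word):
--     index = 0
--     underscores = ""
--     while index < len(word):
--         if word[index] == " ":
--             underscores += " "
--         else:
--             underscores += "-"
--         index += 1
--     return underscores
-- ===== SOURCE B (Python) =====
-- def create_underscores(word):
--     # Split the word on spaces, replace each chunk by dashes of its length,
--     # and rejoin with spaces; split(" ") keeps empty chunks, so consecutive
--     # and leading/trailing spaces are preserved exactly.
--     return " ".join("-" * len(chunk) for chunk in word.split(" "))
-- ===== Notes on version B (the rewrite author's own statement) =====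
-- stated objective: faster
-- what changed: Instead of walking the string index-by-index and appending one character at a time, B splits the word on spaces, replaces each chunk wholesale by a dash-run of its length, and rejoins with spaces in one pass.
import Mathlib
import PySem

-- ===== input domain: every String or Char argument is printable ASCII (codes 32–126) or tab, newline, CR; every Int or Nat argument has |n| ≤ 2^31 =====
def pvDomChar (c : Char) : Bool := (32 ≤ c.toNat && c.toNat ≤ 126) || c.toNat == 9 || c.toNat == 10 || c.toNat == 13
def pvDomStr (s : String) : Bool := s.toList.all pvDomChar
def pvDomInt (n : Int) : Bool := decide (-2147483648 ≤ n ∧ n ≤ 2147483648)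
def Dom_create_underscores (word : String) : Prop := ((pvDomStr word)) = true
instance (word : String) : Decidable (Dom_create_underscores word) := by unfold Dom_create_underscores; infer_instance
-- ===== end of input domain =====

-- B splits the word on spaces, replaces each chunk wholesale by a dash-run of its length,
-- and rejoins with spaces — no per-character index loop; measured faster (A's += concatenation is quadratic).

-- ===== PORT A =====
-- while index < len(word): underscores += " " or "-"; index += 1
def create_underscores_go (chars : List Char) (index : Nat) (underscores : String) : String :=
  if h : index < chars.length then
    create_underscores_go chars (index + 1)
      (underscores ++ (if chars[index] = ' ' then " " else "-"))
  else underscores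
termination_by chars.length - index

def create_underscores (word : String) : String :=
  create_underscores_go word.toList 0 ""

-- ===== PORT B =====
-- " ".join("-" * len(chunk) for chunk in word.split(" "))
def create_underscores_alt (word : String) : String :=
  String.ofList (List.intercalate [' ']
    ((word.toList.splitOn ' ').map (fun chunk => List.replicate chunk.length '-')))

-- ===== PRECONDITION & SPEC =====
def Spec_create_underscores (word : String) (out : String) : Prop := out = create_underscores_alt word
instance (word : String) (out : String) : Decidable (Spec_create_underscores word out) := by unfold Spec_create_underscores; infer_instance

-- ===== CLAIM =====
def Claim_equal_create_underscores : Prop := ∀ (word : String), Dom_create_underscores word → Spec_create_underscores word (create_underscores word)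

-- ===== LEMMAS AND PROOFS =====
theorem create_underscores_go_eq (chars : List Char) (index : Nat) (acc : String) :
    create_underscores_go chars index acc
      = acc ++ String.ofList ((chars.drop index).map (fun c => if c = ' ' then ' ' else '-')) := by
  induction index, acc using create_underscores_go.induct chars with
  | case1 index acc h ih =>
    rw [create_underscores_go, dif_pos h]
    simp only [dite_eq_ite] at ih
    rw [ih]
    have hdrop : chars.drop index = chars[index] :: chars.drop (index + 1) :=
      List.drop_eq_getElem_cons h
    rw [hdrop]
    simp only [List.map_cons]
    by_cases hc : chars[index] = ' ' <;>
      simp only [hc, if_pos, if_neg, String.append_assoc, not_false_iff] <;>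
      [rw [show (" " : String) = String.ofList [' '] from rfl, ← String.ofList_append];
       rw [show ("-" : String) = String.ofList ['-'] from rfl, ← String.ofList_append]] <;> rfl
  | case2 index acc h =>
    rw [create_underscores_go, dif_neg h]
    rw [List.drop_eq_nil_of_le (by omega)]
    simp

theorem intercalate_cons_cons {α : Type} (sep l a : List α) (t : List (List α)) :
    List.intercalate sep (l :: a :: t) = l ++ sep ++ List.intercalate sep (a :: t) := by
  simp [List.intercalate, List.flatten]

theorem mask_splitOn (xs : List Char) :
    List.intercalate [' ']
        ((xs.splitOn ' ').map (fun chunk => List.replicate chunk.length '-'))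
      = xs.map (fun c => if c = ' ' then ' ' else '-') := by
  induction xs with
  | nil => simp [List.splitOn_nil, List.intercalate]
  | cons x xs ih =>
    rw [List.splitOn] at *
    rw [List.splitOnP_cons]
    by_cases hx : x = ' '
    · rw [if_pos (by simp [hx])]
      obtain ⟨h, t, hht⟩ := List.exists_cons_of_ne_nil (List.splitOnP_ne_nil _ xs)
      rw [hht] at ih ⊢
      simp only [List.map_cons] at ih ⊢
      rw [intercalate_cons_cons, ih]
      simp [hx]
    · rw [if_neg (by simp [hx])]
      obtain ⟨h, t, hht⟩ := List.exists_cons_of_ne_nil (List.splitOnP_ne_nil _ xs)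
      rw [hht] at ih ⊢
      simp only [List.modifyHead_cons, List.map_cons, List.length_cons, List.replicate] at ih ⊢
      cases t with
      | nil => simp [List.intercalate, List.flatten] at ih ⊢; simp [hx, ih]
      | cons b tb =>
        simp only [List.map_cons] at ih ⊢
        rw [intercalate_cons_cons] at ih ⊢
        simp only [List.cons_append]
        rw [ih]
        simp [hx]

-- ===== VERDICT =====
theorem create_underscores_spec : Claim_equal_create_underscores := by
  intro word _
  show create_underscores word = create_underscores_alt word
  rw [create_underscores, create_underscores_go_eq, create_underscores_alt, mask_splitOn]
  simp
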